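-- pv_equiv track=rewrite | github.com/Maady321/code-reviewer | backend/app/utils/parser.py | split_large_file
-- ===== SOURCE A (Python) =====
-- def split_large_file(code: str, max_lines: int = 500) -> list[str]:
--     lines = code.splitlines()
--     chunks = []
--     current_chunk = []
--
--     for i, line in enumerate(lines):
--         current_chunk.append(line)
--         if len(current_chunk) >= max_lines:
--             chunks.append("\n".join(current_chunk))
--             current_chunk = []
--
--     if current_chunk:
--         chunks.append("\n".join(current_chunk))
--
--     return chunks
-- ===== SOURCE B (Python) =====
-- def split_large_file(code: str, max_lines: int = 500) -> list[str]:
--     lines = code.splitlines()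
--     step = max(max_lines, 1)
--     return ["\n".join(lines[i:i + step]) for i in range(0, len(lines), step)]
-- ===== Notes on version B (the rewrite author's own statement) =====
-- stated objective: idiomatic
-- what changed: Replaces the per-line accumulator loop with flush-on-counter branch by a list comprehension over chunk-start indices that slices the line list, with step clamped to max(max_lines,1) for the nonpositive case.
import Mathlib
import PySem

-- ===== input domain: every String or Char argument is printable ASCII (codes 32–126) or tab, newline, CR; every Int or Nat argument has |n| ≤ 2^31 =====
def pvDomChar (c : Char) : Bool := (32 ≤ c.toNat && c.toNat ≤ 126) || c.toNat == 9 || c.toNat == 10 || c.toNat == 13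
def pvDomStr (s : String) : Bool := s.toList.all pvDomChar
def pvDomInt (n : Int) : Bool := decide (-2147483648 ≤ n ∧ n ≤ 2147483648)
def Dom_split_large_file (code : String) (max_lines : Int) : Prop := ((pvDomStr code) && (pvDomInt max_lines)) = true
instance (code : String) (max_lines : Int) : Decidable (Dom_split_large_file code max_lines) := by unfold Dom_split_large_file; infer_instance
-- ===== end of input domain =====

-- B replaces A's per-line accumulator loop (flush on a counter) by a comprehension over
-- chunk-start indices slicing the line list (objective: idiomatic). Proved equal on all inputs.

-- ===== PORT A =====
-- A's loop body: append the line to the current chunk, flush when len(current) >= max_lines.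
def pvStepA (m : Int) (st : List String × List String) (line : String) : List String × List String :=
  let current := st.2 ++ [line]
  if m ≤ (current.length : Int) then (st.1 ++ [PySem.Str.join "\n" current], [])
  else (st.1, current)

-- A's trailing "if current_chunk: chunks.append(...)".
def pvFinishA (st : List String × List String) : List String :=
  if st.2 ≠ [] then st.1 ++ [PySem.Str.join "\n" st.2] else st.1

def split_large_file (code : String) (max_lines : Int) : List String :=
  let lines := PySem.Str.splitlines code
  pvFinishA ((PySem.List.enumerate lines 0).foldl (fun st p => pvStepA max_lines st p.2) ([], []))

-- ===== PORT B =====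
def split_large_file_alt (code : String) (max_lines : Int) : List String :=
  let lines := PySem.Str.splitlines code
  let step := max max_lines 1
  (PySem.List.pyRange 0 (lines.length : Int) step).map
    (fun i => PySem.Str.join "\n" (PySem.List.slice lines (some i) (some (i + step))))

-- ===== PRECONDITION & SPEC =====
def Spec_split_large_file (code : String) (max_lines : Int) (out : List String) : Prop := out = split_large_file_alt code max_lines
instance (code : String) (max_lines : Int) (out : List String) : Decidable (Spec_split_large_file code max_lines out) := by unfold Spec_split_large_file; infer_instance

-- ===== CLAIM (what is proved, stated in full; the proofs are below) =====
def Claim_equal_split_large_file : Prop := ∀ (code : String) (max_lines : Int), Dom_split_large_file code max_lines → Spec_split_large_file code max_lines (split_large_file code max_lines)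

-- ===== LEMMAS AND PROOFS =====

-- B's computation as a function of the split line list.
def pvB (m : Int) (lines : List String) : List String :=
  (PySem.List.pyRange 0 (lines.length : Int) (max m 1)).map
    (fun i => PySem.Str.join "\n" (PySem.List.slice lines (some i) (some (i + max m 1))))

-- the enumerate fold ignores the index
theorem foldl_enumerate_snd {α β : Type} (g : β → α → β) :
    ∀ (xs : List α) (s : Int) (init : β),
      (PySem.List.enumerate xs s).foldl (fun st p => g st p.2) init = xs.foldl g init := by
  intro xs
  induction xs with
  | nil => intro s init; simp [PySem.List.enumerate_nil]
  | cons x xs ih => intro s init; simp [PySem.List.enumerate_cons, ih]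

-- A never flushes while the chunk stays strictly below m
theorem pvStepA_noflush (m : Int) :
    ∀ (lines cur : List String) (chunks : List String),
      (cur.length : Int) + lines.length < m →
      lines.foldl (pvStepA m) (chunks, cur) = (chunks, cur ++ lines) := by
  intro lines
  induction lines with
  | nil => intro cur chunks _; simp
  | cons x rest ih =>
    intro cur chunks h
    simp only [List.foldl_cons]
    have hlt : ¬ m ≤ ((cur ++ [x]).length : Int) := by
      simp only [List.length_cons] at h
      simp only [List.length_append, List.length_cons, List.length_nil]
      push_cast at *; omega
    rw [pvStepA]
    simp only [hlt, if_false]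
    rw [ih (cur ++ [x]) chunks
      (by simp only [List.length_cons] at h
          simp only [List.length_append, List.length_cons, List.length_nil]
          push_cast at *; omega)]
    simp

-- step = max m 1 is positive, and its toNat casts back
theorem pvStep_pos (m : Int) : 0 < max m 1 := lt_of_lt_of_le one_pos (le_max_right m 1)

theorem pvStep_toNat (m : Int) : (((max m 1).toNat : Int)) = max m 1 := by
  have := pvStep_pos m; omega

theorem pvS_pos (m : Int) : 1 ≤ (max m 1).toNat := by
  have := pvStep_pos m; omega

-- the flush condition, for a nonempty chunk, is exactly "length reached (max m 1).toNat"
theorem pvCond_iff (m : Int) (k : Nat) (hk : 1 ≤ k) :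
    (m ≤ (k : Int)) ↔ (max m 1).toNat ≤ k := by
  rcases le_total m 1 with h | h
  · have hmax : max m 1 = 1 := by omega
    rw [hmax]
    constructor <;> intro _ <;> omega
  · have hmax : max m 1 = m := by omega
    rw [hmax]; omega

-- processing lines from a partial chunk up to (and through) the first flush
theorem pvStepA_fill (m : Int) :
    ∀ (lines cur chunks : List String),
      cur.length < (max m 1).toNat →
      (max m 1).toNat ≤ cur.length + lines.length →
      lines.foldl (pvStepA m) (chunks, cur) =
        (lines.drop ((max m 1).toNat - cur.length)).foldl (pvStepA m)
          (chunks ++ [PySem.Str.join "\n" (cur ++ lines.take ((max m 1).toNat - cur.length))], []) := by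
  intro lines
  induction lines with
  | nil => intro cur chunks h1 h2; simp at h2; omega
  | cons x rest ih =>
    intro cur chunks h1 h2
    have hlen : (cur ++ [x]).length = cur.length + 1 := by simp
    simp only [List.foldl_cons]
    by_cases hc : m ≤ ((cur ++ [x]).length : Int)
    · have hs : (max m 1).toNat ≤ (cur ++ [x]).length :=
        (pvCond_iff m _ (by simp)).mp hc
      have he : (max m 1).toNat - cur.length = 1 := by omega
      rw [pvStepA]
      simp only [hc, if_true, he]
      simp
    · have hs : ¬ (max m 1).toNat ≤ (cur ++ [x]).length := fun h =>
        hc ((pvCond_iff m _ (by simp)).mpr h)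
      have h1' : (cur ++ [x]).length < (max m 1).toNat := by omega
      have h2' : (max m 1).toNat ≤ (cur ++ [x]).length + rest.length := by
        simp only [List.length_cons] at h2; omega
      rw [pvStepA]
      simp only [hc, if_false]
      rw [ih (cur ++ [x]) chunks h1' h2']
      have h3 : (max m 1).toNat - cur.length = ((max m 1).toNat - (cur ++ [x]).length) + 1 := by
        omega
      rw [h3]
      simp [List.take_succ_cons, List.drop_succ_cons]

-- a positive-step range over (0, L) peels its first element
theorem pvRange_pos_cons (L step : Int) (hs : 0 < step) (hL : 0 < L) :
    PySem.List.pyRange 0 L step = 0 :: (PySem.List.pyRange 0 (L - step) step).map (· + step) := by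
  rw [PySem.List.pyRange_of_pos _ _ hs, PySem.List.pyRange_of_pos _ _ hs]
  have hN : ((L - 0 + step - 1) / step).toNat =
      (if 0 < L - step then ((L - step - 0 + step - 1) / step).toNat else 0) + 1 := by
    have hdiv : (L - 0 + step - 1) / step = (L - 1) / step + 1 := by
      have harith : L - 0 + step - 1 = (L - 1) + 1 * step := by ring
      rw [harith, Int.add_mul_ediv_right _ _ (by omega)]
    split_ifs with h
    · have harith : L - step - 0 + step - 1 = L - 1 := by ring
      rw [harith, hdiv]
      have h0 : 0 ≤ (L - 1) / step := Int.ediv_nonneg (by omega) (by omega)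
      omega
    · have hz : (L - 1) / step = 0 := Int.ediv_eq_zero_of_lt (by omega) (by omega)
      rw [hdiv, hz]
      omega
  rw [if_pos (by omega), hN, List.range_succ_eq_map]
  simp only [List.map_cons, List.map_map]
  congr 1
  · push_cast; ring
  · refine List.map_congr_left ?_
    intro k _
    simp only [Function.comp_apply]
    push_cast
    ring

theorem pvRange_pos_nil (L step : Int) (hs : 0 < step) (hL : L ≤ 0) :
    PySem.List.pyRange 0 L step = [] := by
  rw [PySem.List.pyRange_of_pos _ _ hs, if_neg (by omega)]
  simp

theorem pvB_nil (m : Int) : pvB m [] = [] := by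
  unfold pvB
  rw [pvRange_pos_nil _ _ (pvStep_pos m) (by simp)]
  simp

-- a nonempty list that fits in one chunk gives exactly one chunk
theorem pvB_single (m : Int) (lines : List String)
    (h1 : 0 < lines.length) (h2 : lines.length ≤ (max m 1).toNat) :
    pvB m lines = [PySem.Str.join "\n" lines] := by
  have ht := pvStep_toNat m
  unfold pvB
  rw [pvRange_pos_cons _ _ (pvStep_pos m) (by exact_mod_cast h1)]
  rw [pvRange_pos_nil _ _ (pvStep_pos m) (by omega)]
  simp only [List.map_nil, List.map_cons]
  rw [PySem.List.slice_zero_start, zero_add, PySem.List.slice_to,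
    List.take_of_length_le h2]
  exact le_of_lt (pvStep_pos m)

-- peel one chunk off B
theorem pvB_cons (m : Int) (lines : List String)
    (hL : (max m 1).toNat ≤ lines.length) :
    pvB m lines =
      PySem.Str.join "\n" (lines.take ((max m 1).toNat)) ::
        pvB m (lines.drop ((max m 1).toNat)) := by
  have hstep : (0 : Int) < max m 1 := pvStep_pos m
  have hcast : ((max m 1).toNat : Int) = max m 1 := pvStep_toNat m
  have hs1 : 1 ≤ (max m 1).toNat := pvS_pos m
  unfold pvB
  rw [pvRange_pos_cons _ _ hstep (by omega)]
  simp only [List.map_cons, List.map_map]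
  congr 1
  · rw [PySem.List.slice_zero_start, zero_add, PySem.List.slice_to]
    exact le_of_lt hstep
  · rw [List.length_drop]
    have hlen : ((lines.length - (max m 1).toNat : Nat) : Int) =
        (lines.length : Int) - max m 1 := by omega
    rw [hlen]
    refine List.map_congr_left ?_
    intro i hi
    have hi0 : 0 ≤ i := ((PySem.List.mem_pyRange_iff_of_pos hstep i).mp hi).1
    simp only [Function.comp_apply]
    have hi' : i = (i.toNat : Int) := by omega
    rw [hi', ← hcast]
    simp only [Int.toNat_natCast]
    rw [PySem.List.slice_natCast_add (lines.drop ((max m 1).toNat)) i.toNat ((max m 1).toNat)]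
    have e1 : (i.toNat : Int) + ((max m 1).toNat : Int) =
        ((i.toNat + (max m 1).toNat : Nat) : Int) := by push_cast; ring
    rw [e1, PySem.List.slice_natCast_add lines, List.drop_drop]
    rw [Nat.add_comm]

-- main invariant: running A's loop from (chunks, []) and finishing equals chunks ++ B
theorem pvMain (m : Int) :
    ∀ (lines chunks : List String),
      pvFinishA (lines.foldl (pvStepA m) (chunks, [])) = chunks ++ pvB m lines := by
  suffices H : ∀ (n : Nat) (lines chunks : List String), lines.length = n →
      pvFinishA (lines.foldl (pvStepA m) (chunks, [])) = chunks ++ pvB m lines by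
    intro lines chunks; exact H lines.length lines chunks rfl
  intro n
  induction n using Nat.strong_induction_on with
  | _ n ih =>
    intro lines chunks hn
    have hs1 : 1 ≤ (max m 1).toNat := pvS_pos m
    by_cases hcase : (max m 1).toNat ≤ lines.length
    · rw [pvStepA_fill m lines [] chunks (by simp only [List.length_nil]; omega) (by simpa using hcase)]
      simp only [List.length_nil, Nat.sub_zero, List.nil_append]
      rw [ih (lines.drop ((max m 1).toNat)).length
        (by rw [List.length_drop]; omega) _ _ rfl]
      rw [pvB_cons m lines hcase]
      simp
    · rcases List.eq_nil_or_concat' lines with hnil | ⟨_, _, _⟩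
      · subst hnil
        simp [pvFinishA, pvB_nil]
      · have hpos : 0 < lines.length := by subst hn; simp_all
        have ht := pvStep_toNat m
        have hm : (lines.length : Int) < m := by
          rcases max_choice m 1 with h | h <;> rw [h] at ht hcase <;> omega
        rw [pvStepA_noflush m lines [] chunks (by simpa using hm)]
        rw [pvB_single m lines hpos (by omega)]
        have hne : lines ≠ [] := by
          intro h; rw [h] at hpos; simp at hpos
        simp [pvFinishA, hne]

-- ===== VERDICT (by name: the statement is the Claim_ definition above) =====
theorem split_large_file_spec : Claim_equal_split_large_file := by
  intro code max_lines _
  unfold Spec_split_large_file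
  show pvFinishA ((PySem.List.enumerate (PySem.Str.splitlines code) 0).foldl
      (fun st p => pvStepA max_lines st p.2) ([], [])) = pvB max_lines (PySem.Str.splitlines code)
  rw [foldl_enumerate_snd (pvStepA max_lines) (PySem.Str.splitlines code) 0 ([], [])]
  simpa using pvMain max_lines (PySem.Str.splitlines code) []
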